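-- pv_equiv track=rewrite | github.com/gabosarmiento/i2c-factory | src/i2c/agents/core_agents_old.py | _extract_file_list
-- ===== SOURCE A (Python) =====
-- from typing import Dict, List, Any, Optional, Union, Tuple
--
-- def _extract_file_list(prompt: str) -> List[str]:
--     """Extract file list from the prompt"""
--     file_list = []
--     lines = prompt.split('\n')
--
--     # Skip any header lines and collect filenames
--     collecting = False
--     for line in lines:
--         line = line.strip()
--
--         # Start collecting after we see "Files:" or similar header
--         if "files:" in line.lower() or "filenames:" in line.lower():
--             collecting = True
--             continue
--
--         # Skip empty lines
--         if not line:
--             continue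
--
--         # If we're collecting and the line looks like a filename, add it
--         if collecting and not line.startswith('#') and not line.startswith('-'):
--             file_list.append(line)
--
--     return file_list
-- ===== SOURCE B (Python) =====
-- def _extract_file_list(prompt: str):
--     """Locate the first header line, then filter the lines after it."""
--     lines = prompt.split('\n')
--     idx = next((i for i, l in enumerate(lines)
--                 if 'files:' in l.strip().lower() or 'filenames:' in l.strip().lower()), None)
--     if idx is None:
--         return []
--     out = []
--     for l in lines[idx + 1:]:
--         s = l.strip()
--         low = s.lower()
--         if s and 'files:' not in low and 'filenames:' not in low \
--            and not s.startswith('#') and not s.startswith('-'):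
--             out.append(s)
--     return out
-- ===== Notes on version B (the rewrite author's own statement) =====
-- stated objective: simpler
-- what changed: Replaces A's single fold carrying a boolean collection flag by an explicit two-phase structure: find the index of the first header line, then filter the stripped lines after it.
import Mathlib
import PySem

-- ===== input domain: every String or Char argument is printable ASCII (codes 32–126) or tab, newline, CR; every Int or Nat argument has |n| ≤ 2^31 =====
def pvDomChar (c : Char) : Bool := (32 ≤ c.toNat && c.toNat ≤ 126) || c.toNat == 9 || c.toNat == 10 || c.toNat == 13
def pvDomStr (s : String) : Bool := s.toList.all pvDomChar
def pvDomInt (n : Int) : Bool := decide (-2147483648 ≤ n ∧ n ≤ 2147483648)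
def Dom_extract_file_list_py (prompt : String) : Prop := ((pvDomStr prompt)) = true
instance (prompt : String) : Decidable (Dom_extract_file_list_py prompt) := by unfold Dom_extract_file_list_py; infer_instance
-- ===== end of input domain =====

-- B replaces A's stateful boolean flag with a locate-header-then-filter two-phase pass (objective: simpler decomposition, same cost).

-- shared helper: "files:" in line.lower() or "filenames:" in line.lower()
def pvIsHeader (l : String) : Bool :=
  PySem.Str.isIn "files:" (PySem.Str.lower l) || PySem.Str.isIn "filenames:" (PySem.Str.lower l)

-- ===== PORT A =====
def extract_file_list_py (prompt : String) : List String :=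
  let lines := (PySem.Str.split? prompt "\n").getD []
  let r := lines.foldl (fun (st : Bool × List String) line =>
    let line := PySem.Str.strip line
    if pvIsHeader line then (true, st.2)
    else if line = "" then st
    else if st.1 && !(PySem.Str.startswith line "#") && !(PySem.Str.startswith line "-") then
      (st.1, st.2 ++ [line])
    else st) (false, [])
  r.2

-- ===== PORT B =====
def pvKeep (l : String) : Option String :=
  let s := PySem.Str.strip l
  if s ≠ "" && !pvIsHeader s && !(PySem.Str.startswith s "#") && !(PySem.Str.startswith s "-") then
    some s
  else none

def extract_file_list_py_alt (prompt : String) : List String :=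
  let lines := (PySem.Str.split? prompt "\n").getD []
  match lines.findIdx? (fun l => pvIsHeader (PySem.Str.strip l)) with
  | none => []
  | some i => (lines.drop (i + 1)).filterMap pvKeep

-- ===== PRECONDITION & SPEC =====
def Spec_extract_file_list_py (prompt : String) (out : List String) : Prop := out = extract_file_list_py_alt prompt
instance (prompt : String) (out : List String) : Decidable (Spec_extract_file_list_py prompt out) := by unfold Spec_extract_file_list_py; infer_instance

-- ===== CLAIM (what is proved, stated in full; the proofs are below) =====
def Claim_equal_extract_file_list_py : Prop := ∀ (prompt : String), Dom_extract_file_list_py prompt → Spec_extract_file_list_py prompt (extract_file_list_py prompt)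

-- ===== LEMMAS AND PROOFS =====

def pvStep (st : Bool × List String) (line : String) : Bool × List String :=
  let line := PySem.Str.strip line
  if pvIsHeader line then (true, st.2)
  else if line = "" then st
  else if st.1 && !(PySem.Str.startswith line "#") && !(PySem.Str.startswith line "-") then
    (st.1, st.2 ++ [line])
  else st

-- once collecting, each line contributes exactly (pvKeep line).toList
theorem pvStep_true (acc : List String) (l : String) :
    pvStep (true, acc) l = (true, acc ++ (pvKeep l).toList) := by
  simp only [pvStep, pvKeep]
  split_ifs with h1 h2 h3 h4 <;> simp_all

-- once collecting, the fold appends exactly the kept lines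
theorem pv_fold_true (ls : List String) (acc : List String) :
    ls.foldl pvStep (true, acc) = (true, acc ++ ls.filterMap pvKeep) := by
  induction ls generalizing acc with
  | nil => simp
  | cons l ls ih =>
    rw [List.foldl_cons, pvStep_true, ih]
    cases hk : pvKeep l <;> simp [hk]

-- before the header, state stays (false, []); after the first header, pv_fold_true applies
theorem pv_fold_false (ls : List String) :
    (ls.foldl pvStep (false, [])).2 =
      (match ls.findIdx? (fun l => pvIsHeader (PySem.Str.strip l)) with
       | none => []
       | some i => (ls.drop (i + 1)).filterMap pvKeep) := by
  induction ls with
  | nil => simp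
  | cons l ls ih =>
    by_cases h : pvIsHeader (PySem.Str.strip l)
    · simp only [List.foldl_cons, List.findIdx?_cons, h, if_pos]
      have : pvStep (false, []) l = (true, []) := by
        simp [pvStep, h]
      rw [this, pv_fold_true]
      simp
    · have hstep : pvStep (false, ([] : List String)) l = (false, []) := by
        simp only [pvStep, h]
        split_ifs <;> simp_all
      simp only [List.foldl_cons, hstep, List.findIdx?_cons, h, Bool.false_eq_true, ite_false]
      rw [ih]
      cases hfi : ls.findIdx? (fun l => pvIsHeader (PySem.Str.strip l)) <;> simp

-- ===== VERDICT (by name: the statement is the Claim_ definition above) =====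
theorem extract_file_list_py_spec : Claim_equal_extract_file_list_py := by
  intro prompt _
  unfold Spec_extract_file_list_py extract_file_list_py extract_file_list_py_alt
  exact pv_fold_false _
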